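-- pv_equiv track=rewrite | github.com/BogdanDumbravean/Artificial-Intelligence | Lab 1/Cryptarithmetic.py | arithmCheckSol
-- ===== SOURCE A (Python) =====
-- def arithmCheckSol(A):
--     # build result in reverse order
--     result = []
--     for i in range(len(A) - 1):
--         word = A[i][:]
--         word.reverse()
--
--         for j in range(len(A[i])):
--             if(j >= len(result)):
--                 result.append(word[j])
--             else:
--                 result[j] += word[j]
--
--     x = 0
--     i = 0
--     while(True):
--         if(len(result) > i):
--             result[i] += x
--         else:
--             result.append(x)
--
--         x = result[i] // 16
--         result[i] = result[i] % 16
--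
--         i += 1
--
--         if(x == 0 and i >= len(result)):
--             break
--
--
--     # reverse the result
--     result.reverse()
--     return result == A[len(A)-1]
-- ===== SOURCE B (Python) =====
-- def arithmCheckSol(A):
--     ops, last = A[:-1], A[-1]
--     S = 0
--     L = 0
--     for w in ops:
--         v = 0
--         for d in w:
--             v = v * 16 + d
--         S += v
--         if len(w) > L:
--             L = len(w)
--     digits = []
--     while S > 0:
--         digits.append(S % 16)
--         S //= 16
--     if not digits:
--         digits = [0]
--     digits += [0] * (L - len(digits))
--     return digits[::-1] == last
-- ===== Notes on version B (the rewrite author's own statement) =====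
-- stated objective: alternative
-- what changed: B replaces A's columnwise digit addition followed by an in-place carry-propagation while-loop with plain integer arithmetic: each operand row is folded into one base-16 integer, the integers are summed, and the sum is re-expanded once into base-16 digits and zero-padded to the widest operand before comparing with the last row.
import Mathlib
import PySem

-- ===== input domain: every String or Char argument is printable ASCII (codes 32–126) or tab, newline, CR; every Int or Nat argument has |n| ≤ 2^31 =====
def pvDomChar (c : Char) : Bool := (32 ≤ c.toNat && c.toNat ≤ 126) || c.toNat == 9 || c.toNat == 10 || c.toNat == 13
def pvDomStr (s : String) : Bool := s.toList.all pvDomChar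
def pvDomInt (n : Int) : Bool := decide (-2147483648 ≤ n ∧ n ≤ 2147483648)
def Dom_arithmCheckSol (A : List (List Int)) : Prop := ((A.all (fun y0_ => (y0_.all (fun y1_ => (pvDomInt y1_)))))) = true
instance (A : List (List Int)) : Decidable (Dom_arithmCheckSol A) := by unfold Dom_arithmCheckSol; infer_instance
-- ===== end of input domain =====

-- B replaces A's columnwise digit addition with carry propagation by one integer sum of the
-- operands' base-16 values followed by a single base-16 re-expansion (objective: alternative).


-- ===== PORT A =====
-- inner loop 'for j in range(len(A[i])): …': pointwise addition of the reversed word onto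
-- result, appending where result is shorter (exact restructuring of the indexed loop)
def pvAddCols : List Int → List Int → List Int
  | r, [] => r
  | [], w => w
  | r :: rs, d :: ws => (r + d) :: pvAddCols rs ws

-- little-endian base-16 value of a column list (used only to size the fuel of the while loop)
def pvValLE : List Int → Int
  | [] => 0
  | d :: ds => d + 16 * pvValLE ds

-- the 'while(True)' carry loop; state: done = finalized digits (reversed), pending = the part
-- of result at index ≥ i, x = carry; fuel bounds the iteration count (ample on Pre_ inputs,
-- where the loop terminates; Python diverges outside Pre_)
def pvCarryA : Nat → List Int → List Int → Int → List Int
  | 0, done, pending, _ => done.reverse ++ pending   -- fuel exhausted: unreachable under Pre_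
  | fuel + 1, done, pending, x =>
    match pending with
    | c :: rest =>
      let t := c + x
      let x' := PySem.Int.floordiv t 16
      let d := PySem.Int.mod t 16
      if x' = 0 ∧ rest = [] then (d :: done).reverse
      else pvCarryA fuel (d :: done) rest x'
    | [] =>
      let x' := PySem.Int.floordiv x 16
      let d := PySem.Int.mod x 16
      if x' = 0 then (d :: done).reverse
      else pvCarryA fuel (d :: done) [] x'

def arithmCheckSol (A : List (List Int)) : Bool :=
  -- for i in range(len(A)-1): fold the reversed words into result
  let cols := A.dropLast.foldl (fun res w => pvAddCols res w.reverse) []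
  let res := pvCarryA (cols.length + (pvValLE cols).toNat + 1) [] cols 0
  match PySem.List.pyGet? A (PySem.List.len A - 1) with
  | some last => res.reverse == last
  | none => false   -- A == []: Python raises IndexError (excluded by Pre_)

-- ===== PORT B =====
-- v = 0; for d in w: v = v*16 + d
def pvBigVal (w : List Int) : Int := w.foldl (fun v d => v * 16 + d) 0

-- while S > 0: digits.append(S % 16); S //= 16
def pvBDigits (S : Int) : List Int :=
  if _h : 0 < S then PySem.Int.mod S 16 :: pvBDigits (PySem.Int.floordiv S 16) else []
  termination_by S.toNat
  decreasing_by
    have h16 : PySem.Int.floordiv S 16 = S / 16 := PySem.Int.floordiv_eq_ediv_of_pos (by omega)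
    omega

def arithmCheckSol_alt (A : List (List Int)) : Bool :=
  match PySem.List.pyGet? A (-1) with
  | none => false   -- A == []: Python raises IndexError (excluded by Pre_)
  | some last =>
    let ops := PySem.List.slice A none (some (-1))    -- A[:-1]
    let SL := ops.foldl
      (fun (p : Int × Int) w =>
        (p.1 + pvBigVal w, if PySem.List.len w > p.2 then PySem.List.len w else p.2))
      ((0 : Int), (0 : Int))
    let ds := pvBDigits SL.1
    let ds := if ds = [] then [(0 : Int)] else ds
    let ds := ds ++ List.replicate (SL.2 - (ds.length : Int)).toNat 0   -- [0] * (L - len(digits))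
    ds.reverse == last

-- ===== PRECONDITION & SPEC =====
-- total base-16 value of the operand rows (all rows but the last)
def pvOpSum (A : List (List Int)) : Int := A.dropLast.foldl (fun s w => s + pvBigVal w) 0

-- Pre_ excludes the empty list, on which A raises IndexError at A[len(A)-1], and inputs whose
-- operand rows have a negative total base-16 value, on which A's carry loop never terminates
-- (the floor-divided carry stays negative forever); A returns on exactly the inputs admitted.
def Pre_arithmCheckSol (A : List (List Int)) : Prop := A ≠ [] ∧ 0 ≤ pvOpSum A
instance (A : List (List Int)) : Decidable (Pre_arithmCheckSol A) := by
  unfold Pre_arithmCheckSol; infer_instance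

def pvWitness_arithmCheckSol : List (List Int) := [[1, 2], [3], [1, 5]]

def Spec_arithmCheckSol (A : List (List Int)) (out : Bool) : Prop := out = arithmCheckSol_alt A
instance (A : List (List Int)) (out : Bool) : Decidable (Spec_arithmCheckSol A out) := by
  unfold Spec_arithmCheckSol; infer_instance

-- ===== CLAIM (what is proved, stated in full; the proofs are below) =====
def Claim_equal_arithmCheckSol : Prop := ∀ (A : List (List Int)), Dom_arithmCheckSol A → Pre_arithmCheckSol A → Spec_arithmCheckSol A (arithmCheckSol A)

-- ===== LEMMAS AND PROOFS =====
-- little-endian digits of n, at least max 1 L of them: the common normal form of both results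
def pvNormTo (n L : Nat) : List Nat :=
  if n = 0 ∧ L = 0 then [] else n % 16 :: pvNormTo (n / 16) (L - 1)
  termination_by n + L
  decreasing_by
    rename_i h
    rcases Nat.eq_zero_or_pos L with hL | hL
    · simp [hL] at h ⊢; omega
    · omega

theorem pvNormTo_zero (L : Nat) : pvNormTo 0 L = List.replicate L 0 := by
  induction L with
  | zero => rw [pvNormTo]; simp
  | succ k ih => rw [pvNormTo]; simp [ih, List.replicate_succ]

theorem pvValLE_append (xs ys : List Int) :
    pvValLE (xs ++ ys) = pvValLE xs + 16 ^ xs.length * pvValLE ys := by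
  induction xs with
  | nil => simp [pvValLE]
  | cons d xs ih => simp [pvValLE, ih, pow_succ]; ring

theorem pvBigVal_foldl (w : List Int) (a : Int) :
    w.foldl (fun v d => v * 16 + d) a = pvValLE w.reverse + 16 ^ w.length * a := by
  induction w generalizing a with
  | nil => simp [pvValLE]
  | cons d w ih =>
    simp only [List.foldl_cons, List.reverse_cons, ih, pvValLE_append, List.length_cons,
      List.length_reverse, pvValLE, pow_succ]
    ring

theorem pvBigVal_eq (w : List Int) : pvBigVal w = pvValLE w.reverse := by
  simp [pvBigVal, pvBigVal_foldl w 0]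

theorem pvAddCols_val (r w : List Int) :
    pvValLE (pvAddCols r w) = pvValLE r + pvValLE w := by
  induction r generalizing w with
  | nil => cases w <;> simp [pvAddCols, pvValLE]
  | cons c rs ih =>
    cases w
    · simp [pvAddCols, pvValLE]
    · simp [pvAddCols, pvValLE, ih]; ring

theorem pvAddCols_len (r w : List Int) :
    (pvAddCols r w).length = max r.length w.length := by
  induction r generalizing w with
  | nil => cases w <;> simp [pvAddCols]
  | cons c rs ih => cases w <;> simp [pvAddCols, ih]

-- B's pair fold computes exactly the value and length of A's column list
theorem pv_fold_pair (ops : List (List Int)) (r : List Int) :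
    ops.foldl
      (fun (p : Int × Int) w =>
        (p.1 + pvBigVal w, if (w.length : Int) > p.2 then (w.length : Int) else p.2))
      (pvValLE r, (r.length : Int))
    = (pvValLE (ops.foldl (fun res w => pvAddCols res w.reverse) r),
       ((ops.foldl (fun res w => pvAddCols res w.reverse) r).length : Int)) := by
  induction ops generalizing r with
  | nil => rfl
  | cons w ops ih =>
    have h1 : pvValLE r + pvBigVal w = pvValLE (pvAddCols r w.reverse) := by
      rw [pvBigVal_eq, pvAddCols_val]
    have h2 : (if (w.length : Int) > (r.length : Int) then (w.length : Int)
        else (r.length : Int)) = (((pvAddCols r w.reverse).length : Int)) := by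
      simp only [pvAddCols_len, List.length_reverse]
      split_ifs <;> omega
    simpa only [List.foldl_cons, h1, h2] using ih (pvAddCols r w.reverse)

theorem pv_fold_fst (ops : List (List Int)) (p : Int × Int) :
    (ops.foldl
      (fun (p : Int × Int) w =>
        (p.1 + pvBigVal w, if (w.length : Int) > p.2 then (w.length : Int) else p.2)) p).1
    = ops.foldl (fun s w => s + pvBigVal w) p.1 := by
  induction ops generalizing p with
  | nil => rfl
  | cons w ops ih => simp only [List.foldl_cons]; exact ih _

-- correctness of the fueled carry loop on inputs where it terminates
theorem pvNormTo_step (n L : Nat) (h : ¬(n = 0 ∧ L = 0)) :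
    pvNormTo n L = n % 16 :: pvNormTo (n / 16) (L - 1) := by
  rw [pvNormTo]; simp [h]

theorem pvCarryA_spec : ∀ (fuel : Nat) (done pending : List Int) (x : Int),
    (pending ≠ [] ∨ x ≠ 0) → 0 ≤ x + pvValLE pending →
    pending.length + (x + pvValLE pending).toNat + 1 ≤ fuel →
    pvCarryA fuel done pending x
      = done.reverse ++ (pvNormTo (x + pvValLE pending).toNat pending.length).map Int.ofNat := by
  have hfd : ∀ a : Int, PySem.Int.floordiv a 16 = a / 16 := fun a =>
    PySem.Int.floordiv_eq_ediv_of_pos (by norm_num)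
  have hmd : ∀ a : Int, PySem.Int.mod a 16 = a % 16 := fun a =>
    PySem.Int.mod_eq_emod_of_pos (by norm_num)
  intro fuel
  induction fuel with
  | zero =>
    intro done pending x _ _ hf
    omega
  | succ fuel ih =>
    intro done pending x h0 hS hf
    cases pending with
    | nil =>
      simp only [pvValLE, add_zero] at hS hf ⊢
      have hx : x ≠ 0 := by tauto
      simp only [pvCarryA, hfd, hmd]
      split_ifs with hq
      · have h1 : x.toNat / 16 = 0 := by omega
        have h2 : ¬(x.toNat = 0 ∧ (0 : Nat) = 0) := by omega
        rw [List.length_nil, pvNormTo_step _ _ h2, h1, pvNormTo_zero]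
        have e2 : x % 16 = Int.ofNat (x.toNat % 16) := by simp only [Int.ofNat_eq_natCast]; omega
        simp only [e2, List.reverse_cons, List.replicate, List.map_cons, List.map_nil]
      · rw [ih (x % 16 :: done) [] (x / 16) (Or.inr (by omega)) (by simp [pvValLE]; omega)
          (by simp only [List.length_nil, pvValLE, add_zero] at hf ⊢; omega)]
        simp only [pvValLE, add_zero, List.reverse_cons, List.length_nil]
        have h2 : ¬(x.toNat = 0 ∧ (0 : Nat) = 0) := by omega
        rw [pvNormTo_step _ _ h2]
        have e1 : (x / 16).toNat = x.toNat / 16 := by omega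
        have e2 : x % 16 = Int.ofNat (x.toNat % 16) := by simp only [Int.ofNat_eq_natCast]; omega
        simp only [e1, e2, List.map_cons, List.append_assoc, List.cons_append, List.nil_append]
    | cons c rest =>
      simp only [pvValLE, List.length_cons] at hS hf ⊢
      -- S = x + (c + 16*V), t = c + x
      have hSmod : (c + x) % 16 = (x + (c + 16 * pvValLE rest)) % 16 := by omega
      simp only [pvCarryA, hfd, hmd]
      split_ifs with hq
      · -- carry 0 and last column: loop breaks
        obtain ⟨hq1, hq2⟩ := hq
        subst hq2
        simp only [pvValLE, mul_zero, add_zero, List.length_nil, Nat.zero_add] at hS hSmod ⊢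
        have h2 : ¬((x + c).toNat = 0 ∧ (1 : Nat) = 0) := by omega
        rw [pvNormTo_step _ _ h2]
        have h1 : (x + c).toNat / 16 = 0 := by omega
        rw [h1, Nat.sub_self, pvNormTo_zero]
        have e2 : (c + x) % 16 = Int.ofNat ((x + c).toNat % 16) := by
          simp only [Int.ofNat_eq_natCast]; omega
        simp only [List.reverse_cons, e2, List.map_cons, List.replicate, List.map_nil]
      · -- continue with carry (c+x)/16 on rest
        have hcont : rest ≠ [] ∨ (c + x) / 16 ≠ 0 := by tauto
        have hS' : 0 ≤ (c + x) / 16 + pvValLE rest := by omega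
        have hf' : rest.length + ((c + x) / 16 + pvValLE rest).toNat + 1 ≤ fuel := by omega
        rw [ih ((c + x) % 16 :: done) rest ((c + x) / 16) hcont hS' hf']
        have h2 : ¬((x + (c + 16 * pvValLE rest)).toNat = 0 ∧ rest.length + 1 = 0) := by omega
        rw [pvNormTo_step _ _ h2]
        have e1 : ((c + x) / 16 + pvValLE rest).toNat
            = (x + (c + 16 * pvValLE rest)).toNat / 16 := by omega
        have e2 : (c + x) % 16 = Int.ofNat ((x + (c + 16 * pvValLE rest)).toNat % 16) := by
          simp only [Int.ofNat_eq_natCast]; omega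
        simp only [List.reverse_cons, e1, e2, Nat.add_sub_cancel, List.map_cons,
          List.append_assoc, List.cons_append, List.nil_append]

theorem pvBDigits_nat (n : Nat) :
    pvBDigits (n : Int)
      = if 0 < n then ((n % 16 : Nat) : Int) :: pvBDigits ((n / 16 : Nat) : Int) else [] := by
  rw [pvBDigits]
  by_cases h : 0 < n
  · have h1 : PySem.Int.mod (n : Int) 16 = ((n % 16 : Nat) : Int) := by
      rw [PySem.Int.mod_eq_emod_of_pos (by norm_num)]; omega
    have h2 : PySem.Int.floordiv (n : Int) 16 = ((n / 16 : Nat) : Int) := by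
      rw [PySem.Int.floordiv_eq_ediv_of_pos (by norm_num)]; omega
    rw [dif_pos (by exact_mod_cast h), if_pos h, h1, h2]
  · rw [dif_neg (by exact_mod_cast h), if_neg h]

-- B's decorated digit list is the normal form
theorem pvBDigits_pad (n L : Nat) (h : 0 < n ∨ 0 < L) :
    (pvNormTo n L).map Int.ofNat
      = (if pvBDigits (n : Int) = [] then [(0 : Int)] else pvBDigits (n : Int)) ++
        List.replicate (L - (if pvBDigits (n : Int) = [] then [(0 : Int)]
          else pvBDigits (n : Int)).length) 0 := by
  induction n using Nat.strong_induction_on generalizing L with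
  | _ n ih =>
    by_cases hn : n = 0
    · subst hn
      rw [pvBDigits_nat]
      simp only [lt_irrefl, pvNormTo_zero, List.map_replicate]
      have hL : L = (L - 1) + 1 := by omega
      rw [hL, List.replicate_succ]
      simp
    · have hnz : 0 < n := by omega
      have hne : pvBDigits (n : Int) ≠ [] := by
        rw [pvBDigits_nat, if_pos hnz]; simp
      rw [pvNormTo_step _ _ (by omega), if_neg hne]
      rw [pvBDigits_nat, if_pos hnz]
      simp only [List.map_cons, List.cons_append, List.length_cons, Int.ofNat_eq_natCast,
        List.cons.injEq]
      refine ⟨trivial, ?_⟩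
      have hpad : L - ((pvBDigits ((n / 16 : Nat) : Int)).length + 1)
          = (L - 1) - (pvBDigits ((n / 16 : Nat) : Int)).length := by omega
      rw [hpad]
      by_cases h16 : n / 16 = 0
      · rw [h16, pvNormTo_zero]
        have : pvBDigits ((0 : Nat) : Int) = [] := by rw [pvBDigits_nat]; simp
        rw [this]
        simp [List.map_replicate]
      · have hlt : n / 16 < n := by omega
        have hne2 : pvBDigits ((n / 16 : Nat) : Int) ≠ [] := by
          rw [pvBDigits_nat, if_pos (by omega)]; simp
        have := ih (n / 16) hlt (L - 1) (Or.inl (by omega))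
        rw [if_neg hne2] at this
        exact this

-- ===== VERDICT (by name: the statement is the Claim_ definition above) =====
theorem arithmCheckSol_spec : Claim_equal_arithmCheckSol := by
  unfold Claim_equal_arithmCheckSol
  intro A _ hPre
  obtain ⟨hne, hsum⟩ := hPre
  unfold Spec_arithmCheckSol arithmCheckSol arithmCheckSol_alt
  simp only [PySem.List.len_eq, PySem.List.pyGet?_neg_one, PySem.List.slice_to_neg_one]
  have hlen : (A.length : Int) - 1 = ((A.length - 1 : Nat) : Int) := by
    have : A.length ≠ 0 := by simpa using hne
    omega
  rw [hlen, PySem.List.pyGet?_natCast, ← List.getLast?_eq_getElem?]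
  cases hL : A.getLast? with
  | none => rfl
  | some last =>
    apply congrArg (fun l => l == last)
    apply congrArg
    set cols := List.foldl (fun res w => pvAddCols res w.reverse) [] A.dropLast with hcols
    have hpair : List.foldl
        (fun (p : Int × Int) w =>
          (p.1 + pvBigVal w, if (w.length : Int) > p.2 then (w.length : Int) else p.2))
        (0, 0) A.dropLast = (pvValLE cols, (cols.length : Int)) := by
      have := pv_fold_pair A.dropLast []
      simpa [pvValLE] using this
    have hfst : pvValLE cols = pvOpSum A := by
      have h1 := pv_fold_fst A.dropLast ((0 : Int), (0 : Int))
      rw [hpair] at h1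
      simpa [pvOpSum] using h1
    rw [hpair]
    by_cases hc : cols = []
    · rw [hc]
      simp only [pvValLE, List.length_nil, Int.toNat_zero]
      have hd0 : pvBDigits (0 : Int) = [] := by
        simpa using pvBDigits_nat 0
      rw [hd0]
      norm_num [pvCarryA, PySem.Int.floordiv, PySem.Int.mod]
    · have hLpos : 0 < cols.length := List.length_pos_iff.mpr hc
      have hS0 : 0 ≤ pvValLE cols := by rw [hfst]; exact hsum
      dsimp only
      rw [pvCarryA_spec _ [] cols 0 (Or.inl hc) (by simpa using hS0) (by simp)]
      simp only [List.reverse_nil, List.nil_append, zero_add]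
      have hcast : pvValLE cols = (((pvValLE cols).toNat : Nat) : Int) := by omega
      rw [hcast]
      simp only [Int.toNat_natCast]
      rw [pvBDigits_pad _ _ (Or.inr hLpos)]
      congr 1
      congr 1
      omega
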